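-- pv_equiv track=rewrite | github.com/jym197228/stock_technical_-analysis | sta1.py | three_days
-- ===== SOURCE A (Python) =====
-- def three_days(data): # 判斷買進、賣出訊號
--     signal = []
--     for i in range(len(data)):
--         if i < 3: # 在判斷的當下是不會知道當天收盤價的，所以我們應該要做的事情為判斷"前三天"的收盤價狀況。
--             signal.append(0) # e.g. 第四天判斷第一、二、三天的收盤價
--         elif data[i] > data[i - 1] > data[i - 2] > data[i - 3]:
--             signal.append(1)
--         elif data[i] < data[i - 1] < data[i - 2] < data[i - 3]:
--             signal.append(-1)
--         else:
--             signal.append(0)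
--     return signal
-- ===== SOURCE B (Python) =====
-- def three_days(data):
--     n = len(data)
--     dirs = [0] * n
--     for j in range(1, n):
--         dirs[j] = (data[j] > data[j - 1]) - (data[j] < data[j - 1])
--     sig = []
--     for i in range(n):
--         if i >= 3 and dirs[i] == dirs[i - 1] == dirs[i - 2] != 0:
--             sig.append(dirs[i])
--         else:
--             sig.append(0)
--     return sig
-- ===== Notes on version B (the rewrite author's own statement) =====
-- stated objective: alternative
-- what changed: B precomputes a per-day direction table (+1/-1/0 from consecutive closes) in one pass and then labels each day by whether the last three directions are equal and nonzero, instead of A's chained four-element comparison at every index.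
import Mathlib
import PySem

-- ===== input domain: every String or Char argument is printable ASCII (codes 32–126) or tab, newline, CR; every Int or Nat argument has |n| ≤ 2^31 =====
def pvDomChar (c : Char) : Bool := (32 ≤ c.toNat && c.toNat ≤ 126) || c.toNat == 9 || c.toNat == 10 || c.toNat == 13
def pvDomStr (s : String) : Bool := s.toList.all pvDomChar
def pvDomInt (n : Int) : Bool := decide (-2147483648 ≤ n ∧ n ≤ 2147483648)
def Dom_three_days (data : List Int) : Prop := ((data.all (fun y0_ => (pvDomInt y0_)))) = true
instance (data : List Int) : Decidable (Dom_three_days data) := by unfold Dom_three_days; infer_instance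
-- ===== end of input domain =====

-- B replaces A's chained four-element comparison with a precomputed direction table
-- scanned in windows of three (alternative decomposition, same cost).

-- ===== PORT A =====
-- A: one loop over range(len(data)), appending per the chained comparisons.
def three_days (data : List Int) : List Int :=
  (List.range data.length).foldl (fun signal i =>
    if i < 3 then signal ++ [0]
    else if data.getD i 0 > data.getD (i - 1) 0 ∧ data.getD (i - 1) 0 > data.getD (i - 2) 0 ∧ data.getD (i - 2) 0 > data.getD (i - 3) 0 then signal ++ [1]
    else if data.getD i 0 < data.getD (i - 1) 0 ∧ data.getD (i - 1) 0 < data.getD (i - 2) 0 ∧ data.getD (i - 2) 0 < data.getD (i - 3) 0 then signal ++ [-1]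
    else signal ++ [0]) []

-- ===== PORT B =====
-- dirs[j] = (data[j] > data[j-1]) - (data[j] < data[j-1]) for j ≥ 1, dirs[0] = 0.
def three_days_dirs (data : List Int) : List Int :=
  (List.range data.length).map (fun j =>
    if j = 0 then (0 : Int)
    else (if data.getD j 0 > data.getD (j - 1) 0 then (1 : Int) else 0)
         - (if data.getD j 0 < data.getD (j - 1) 0 then (1 : Int) else 0))

def three_days_alt (data : List Int) : List Int :=
  let dirs := three_days_dirs data
  (List.range data.length).map (fun i =>
    if 3 ≤ i ∧ dirs.getD i 0 = dirs.getD (i - 1) 0 ∧ dirs.getD (i - 1) 0 = dirs.getD (i - 2) 0 ∧ dirs.getD (i - 2) 0 ≠ 0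
    then dirs.getD i 0 else 0)

-- ===== PRECONDITION & SPEC =====
def Spec_three_days (data : List Int) (out : List Int) : Prop := out = three_days_alt data
instance (data : List Int) (out : List Int) : Decidable (Spec_three_days data out) := by unfold Spec_three_days; infer_instance

-- ===== CLAIM (what is proved, stated in full; the proofs are below) =====
def Claim_equal_three_days : Prop := ∀ (data : List Int), Dom_three_days data → Spec_three_days data (three_days data)

-- ===== LEMMAS AND PROOFS =====

theorem foldl_append_singleton {α β : Type} (f : α → β) (l : List α) (acc : List β) :
    l.foldl (fun s i => s ++ [f i]) acc = acc ++ l.map f := by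
  induction l generalizing acc with
  | nil => simp
  | cons x xs ih => simp [List.foldl, ih]

theorem dirs_getD (data : List Int) (j : ℕ) (hj : j < data.length) :
    (three_days_dirs data).getD j 0 =
      (if j = 0 then (0 : Int)
       else (if data.getD j 0 > data.getD (j - 1) 0 then (1 : Int) else 0)
            - (if data.getD j 0 < data.getD (j - 1) 0 then (1 : Int) else 0)) := by
  simp [three_days_dirs, List.getD, hj]

theorem three_days_eq (data : List Int) : Spec_three_days data (three_days data) := by
  unfold Spec_three_days three_days three_days_alt
  have hstep : (fun (signal : List Int) (i : ℕ) =>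
      if i < 3 then signal ++ [0]
      else if data.getD i 0 > data.getD (i - 1) 0 ∧ data.getD (i - 1) 0 > data.getD (i - 2) 0 ∧ data.getD (i - 2) 0 > data.getD (i - 3) 0 then signal ++ [1]
      else if data.getD i 0 < data.getD (i - 1) 0 ∧ data.getD (i - 1) 0 < data.getD (i - 2) 0 ∧ data.getD (i - 2) 0 < data.getD (i - 3) 0 then signal ++ [-1]
      else signal ++ [0]) =
      (fun (signal : List Int) (i : ℕ) => signal ++
        [if i < 3 then (0 : Int)
         else if data.getD i 0 > data.getD (i - 1) 0 ∧ data.getD (i - 1) 0 > data.getD (i - 2) 0 ∧ data.getD (i - 2) 0 > data.getD (i - 3) 0 then 1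
         else if data.getD i 0 < data.getD (i - 1) 0 ∧ data.getD (i - 1) 0 < data.getD (i - 2) 0 ∧ data.getD (i - 2) 0 < data.getD (i - 3) 0 then -1
         else 0]) := by
    funext s i; split_ifs <;> rfl
  rw [hstep, foldl_append_singleton, List.nil_append]
  apply List.map_congr_left
  intro i hi
  rw [List.mem_range] at hi
  by_cases h3 : i < 3
  · have : ¬ 3 ≤ i := by omega
    simp [h3, this]
  · have h3' : 3 ≤ i := by omega
    have hi1 : i - 1 < data.length := by omega
    have hi2 : i - 2 < data.length := by omega
    rw [dirs_getD data i hi, dirs_getD data (i - 1) hi1, dirs_getD data (i - 2) hi2]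
    have e1 : i - 1 - 1 = i - 2 := by omega
    have e2 : i - 2 - 1 = i - 3 := by omega
    have n0 : ¬ i = 0 := by omega
    have n1 : ¬ i - 1 = 0 := by omega
    have n2 : ¬ i - 2 = 0 := by omega
    rw [e1, e2]
    simp only [n0, n1, n2, if_false, h3, if_false, h3', true_and]
    split_ifs <;> omega

-- ===== VERDICT (by name: the statement is the Claim_ definition above) =====
theorem three_days_spec : Claim_equal_three_days := fun data _ => three_days_eq data
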